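-- pv_equiv track=rewrite | github.com/JackWillz/Projects | Data Creation - Jungle Stats per Champion/match_data.py | remove_undos
-- ===== SOURCE A (Python) =====
-- def remove_undos(item_purchase, item_undo):
--     to_delete = []
--     if len(item_undo) > 0:
--         for i in item_undo.keys():
--             item = item_undo[i][0]
--             time = item_undo[i][1]
--             for j in item_purchase.keys():
--                 if item_purchase[j][0] == item and abs(time - item_purchase[j][1]) < 30000 and j not in to_delete:
--                     to_delete.append(j)
--                     break
--     if len(to_delete) > 0:
--         for key in to_delete:
--             del item_purchase[key]
--     new_item_purchase = []
--     for key in item_purchase.keys():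
--         new_item_purchase.append(item_purchase[key][0])
--     return new_item_purchase
-- ===== SOURCE B (Python) =====
-- def remove_undos(item_purchase, item_undo):
--     deleted = set()
--     if item_undo:
--         buckets = {}
--         for j, v in item_purchase.items():
--             buckets.setdefault(v[0], []).append((j, v))
--         for u in item_undo.values():
--             item, time = u[0], u[1]
--             for j, v in buckets.get(item, []):
--                 if abs(time - v[1]) < 30000 and j not in deleted:
--                     deleted.add(j)
--                     break
--     return [v[0] for j, v in item_purchase.items() if j not in deleted]
-- ===== Notes on version B (the rewrite author's own statement) =====
-- stated objective: faster
-- what changed: B builds, in one pass, an index from item id to the ordered bucket of purchases of that item and tracks deletions in a set, so each undo scans only its own item's bucket instead of A's rescan of every purchase with a linear 'not in to_delete' list test.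
-- outside the precondition, e.g. on remove_undos({1: [7, 100], 2: [7]}, {1: [7, 200]}): A returns [7], B returns [7]
import Mathlib
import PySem

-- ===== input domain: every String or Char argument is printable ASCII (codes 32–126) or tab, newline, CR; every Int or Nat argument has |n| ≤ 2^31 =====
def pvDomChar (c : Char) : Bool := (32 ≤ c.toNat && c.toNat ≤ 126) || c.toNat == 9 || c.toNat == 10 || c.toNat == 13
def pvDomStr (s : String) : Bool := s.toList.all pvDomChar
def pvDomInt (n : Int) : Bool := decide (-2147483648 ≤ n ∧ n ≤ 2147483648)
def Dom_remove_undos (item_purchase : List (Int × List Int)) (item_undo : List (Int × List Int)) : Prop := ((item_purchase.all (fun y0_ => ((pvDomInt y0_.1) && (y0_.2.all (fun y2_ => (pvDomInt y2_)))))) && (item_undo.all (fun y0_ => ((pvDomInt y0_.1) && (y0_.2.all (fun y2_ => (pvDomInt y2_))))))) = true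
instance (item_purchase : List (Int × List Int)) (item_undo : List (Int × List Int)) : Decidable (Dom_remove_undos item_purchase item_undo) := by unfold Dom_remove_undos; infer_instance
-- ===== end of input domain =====

-- B replaces A's per-undo rescan of all purchases by a one-pass per-item bucket index plus a
-- deleted-key set (objective: faster). A also deletes the matched keys from its item_purchase
-- dict in place; B does not mutate its arguments — the equivalence proved here is about the
-- RETURN value only.

-- ===== PORT A =====
-- A's inner 'for j in item_purchase.keys(): … append; break' loop
def removeUndosInnerA (P : PySem.Dict Int (List Int)) (item time : Int) (td : List Int) :
    List Int → List Int
  | [] => td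
  | j :: rest =>
    if PySem.List.pyGetD (PySem.Dict.getD P j []) 0 0 == item
        && decide (|time - PySem.List.pyGetD (PySem.Dict.getD P j []) 1 0| < 30000)
        && !(td.contains j) then
      td ++ [j]
    else
      removeUndosInnerA P item time td rest

def remove_undos (item_purchase : List (Int × List Int)) (item_undo : List (Int × List Int)) : List Int :=
  let Pd := PySem.Dict.mk item_purchase
  let Ud := PySem.Dict.mk item_undo
  let to_delete : List Int :=
    if PySem.Dict.size Ud > 0 then
      (PySem.Dict.keys Ud).foldl (fun td i =>
        let item := PySem.List.pyGetD (PySem.Dict.getD Ud i []) 0 0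
        let time := PySem.List.pyGetD (PySem.Dict.getD Ud i []) 1 0
        removeUndosInnerA Pd item time td (PySem.Dict.keys Pd)) []
    else []
  let Pd2 := if to_delete.length > 0 then
      to_delete.foldl (fun d k => PySem.Dict.erase d k) Pd
    else Pd
  (PySem.Dict.keys Pd2).foldl (fun out k =>
    out ++ [PySem.List.pyGetD (PySem.Dict.getD Pd2 k []) 0 0]) []

-- ===== PORT B =====
-- B's inner 'for j, v in buckets.get(item, []): … break' loop (buckets hold the full purchase
-- record (j, v); v[1] is read only inside the bucket of v's own item, as in Source B)
def removeUndosScanB (deleted : PySem.Set Int) (time : Int) : List (Int × List Int) → Option Int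
  | [] => none
  | (j, v) :: rest =>
    if decide (|time - PySem.List.pyGetD v 1 0| < 30000) && !(PySem.Set.contains deleted j) then some j
    else removeUndosScanB deleted time rest

def remove_undos_alt (item_purchase : List (Int × List Int)) (item_undo : List (Int × List Int)) : List Int :=
  let deleted : PySem.Set Int :=
    if item_undo.isEmpty then PySem.Set.empty
    else
      let buckets : PySem.Dict Int (List (Int × List Int)) :=
        item_purchase.foldl (fun b jv =>
          PySem.Dict.modify b (PySem.List.pyGetD jv.2 0 0) []
            (fun l => l ++ [jv])) PySem.Dict.empty
      item_undo.foldl (fun del uv =>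
        match removeUndosScanB del (PySem.List.pyGetD uv.2 1 0)
            (PySem.Dict.getD buckets (PySem.List.pyGetD uv.2 0 0) []) with
        | some j => PySem.Set.add del j
        | none => del) PySem.Set.empty
  (item_purchase.filter (fun jv => !(PySem.Set.contains deleted jv.1))).map
    (fun jv => PySem.List.pyGetD jv.2 0 0)

-- ===== PRECONDITION & SPEC =====
-- Pre_ excludes association lists with duplicate keys (they do not represent a Python dict),
-- value lists missing a field both programs unconditionally read (both raise IndexError), and
-- one-element purchase values whose item occurs among the undo items: there whether the missing
-- time field is ever reached — in which case A and B both raise IndexError — or never reached —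
-- in which case A and B return the same value — depends on scan position, not on a closed-form
-- input shape, so the whole corner is excluded even though A (and B identically) returns on part of it.
def Pre_remove_undos (item_purchase : List (Int × List Int)) (item_undo : List (Int × List Int)) : Prop :=
  (item_purchase.map Prod.fst).Nodup ∧ (item_undo.map Prod.fst).Nodup ∧
  (∀ p ∈ item_purchase, 1 ≤ p.2.length) ∧
  (item_undo ≠ [] →
    (∀ u ∈ item_undo, 2 ≤ u.2.length) ∧
    (∀ p ∈ item_purchase, p.2.length = 1 →
      ∀ u ∈ item_undo, PySem.List.pyGetD u.2 0 0 ≠ PySem.List.pyGetD p.2 0 0))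
instance (item_purchase : List (Int × List Int)) (item_undo : List (Int × List Int)) : Decidable (Pre_remove_undos item_purchase item_undo) := by unfold Pre_remove_undos; infer_instance

def pvWitness_remove_undos : (List (Int × List Int)) × (List (Int × List Int)) :=
  ([(1, [10, 100]), (2, [10, 40000])], [(5, [10, 200])])

def Spec_remove_undos (item_purchase : List (Int × List Int)) (item_undo : List (Int × List Int)) (out : List Int) : Prop := out = remove_undos_alt item_purchase item_undo
instance (item_purchase : List (Int × List Int)) (item_undo : List (Int × List Int)) (out : List Int) : Decidable (Spec_remove_undos item_purchase item_undo out) := by unfold Spec_remove_undos; infer_instance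

-- ===== CLAIM (what is proved, stated in full; the proofs are below) =====
def Claim_equal_remove_undos : Prop := ∀ (item_purchase : List (Int × List Int)) (item_undo : List (Int × List Int)), Dom_remove_undos item_purchase item_undo → Pre_remove_undos item_purchase item_undo → Spec_remove_undos item_purchase item_undo (remove_undos item_purchase item_undo)

-- ===== LEMMAS AND PROOFS =====

-- a fold over a dict's keys that looks each key up again is the fold over its items
theorem foldl_keys_getD {ν β : Type} (U : List (Int × ν)) (d : PySem.Dict Int ν) (dflt : ν)
    (g : β → Int → ν → β) (init : β) (h : ∀ p ∈ U, PySem.Dict.getD d p.1 dflt = p.2) :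
    (U.map Prod.fst).foldl (fun acc k => g acc k (PySem.Dict.getD d k dflt)) init =
      U.foldl (fun acc p => g acc p.1 p.2) init := by
  induction U generalizing init with
  | nil => rfl
  | cons p rest ih =>
    simp only [List.map, List.foldl]
    rw [h p (by simp)]
    exact ih _ (fun q hq => h q (by simp [hq]))

-- the erase loop filters the items list
theorem items_foldl_erase (td : List Int) (d : PySem.Dict Int (List Int)) :
    (td.foldl (fun d k => PySem.Dict.erase d k) d).items =
      d.items.filter (fun p => !(td.contains p.1)) := by
  induction td generalizing d with
  | nil => simp
  | cons k rest ih =>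
    simp only [List.foldl]
    rw [ih, PySem.Dict.erase, List.filter_filter]
    apply List.filter_congr
    intro p _
    by_cases hk : p.1 = k <;> simp [hk]

-- B's bucket for `item` is exactly the purchases of that item, in order
theorem bucket_getD (P : List (Int × List Int)) (item : Int) :
    PySem.Dict.getD
        (P.foldl (fun b jv =>
          PySem.Dict.modify b (PySem.List.pyGetD jv.2 0 0) []
            (fun l => l ++ [jv])) PySem.Dict.empty)
        item [] =
      P.filter (fun jv => PySem.List.pyGetD jv.2 0 0 == item) := by
  have h := PySem.Dict.getD_foldl_modify_append
      (l := P.map (fun jv => (PySem.List.pyGetD jv.2 0 0, jv)))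
      (d := PySem.Dict.empty) (c := item)
  rw [List.foldl_map] at h
  simp only [h, PySem.Dict.getD_empty, List.nil_append, List.filter_map, List.map_map]
  exact List.map_id'' (fun _ => rfl) _

-- a successful B scan returns a key not yet marked deleted
theorem scanB_not_mem (deleted : PySem.Set Int) (time : Int) (l : List (Int × List Int)) (j : Int)
    (h : removeUndosScanB deleted time l = some j) : PySem.Set.contains deleted j = false := by
  induction l with
  | nil => simp [removeUndosScanB] at h
  | cons p rest ih =>
    obtain ⟨j', v'⟩ := p
    rw [removeUndosScanB] at h
    by_cases hc : (decide (|time - PySem.List.pyGetD v' 1 0| < 30000) && !(PySem.Set.contains deleted j')) = true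
    · rw [if_pos hc] at h
      cases h
      simp only [Bool.and_eq_true, Bool.not_eq_true'] at hc
      exact hc.2
    · rw [if_neg hc] at h
      exact ih h

-- A's inner scan over all purchase keys equals B's scan of the item's bucket
theorem innerA_eq_scanB (P : List (Int × List Int)) (d : PySem.Dict Int (List Int))
    (item time : Int) (td : List Int)
    (h : ∀ p ∈ P, PySem.Dict.getD d p.1 [] = p.2) :
    removeUndosInnerA d item time td (P.map Prod.fst) =
      match removeUndosScanB td time
          (P.filter (fun jv => PySem.List.pyGetD jv.2 0 0 == item)) with
      | some j => td ++ [j]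
      | none => td := by
  induction P with
  | nil => rfl
  | cons p rest ih =>
    have hp : PySem.Dict.getD d p.1 [] = p.2 := h p (by simp)
    have hrest := ih (fun q hq => h q (by simp [hq]))
    simp only [List.map, List.filter]
    rw [removeUndosInnerA, hp]
    by_cases hitem : (PySem.List.pyGetD p.2 0 0 == item) = true
    · simp only [hitem, Bool.true_and]
      rw [removeUndosScanB]
      have hset : PySem.Set.contains td p.1 = td.contains p.1 := rfl
      rw [hset]
      by_cases hc : (decide (|time - PySem.List.pyGetD p.2 1 0| < 30000) && !(td.contains p.1)) = true
      · rw [if_pos hc, if_pos hc]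
      · rw [if_neg hc, if_neg hc]
        exact hrest
    · simp only [Bool.not_eq_true] at hitem
      have hne : ¬ PySem.List.pyGetD p.2 0 0 = item := by simpa using hitem
      rw [if_neg (by simp [hne])]
      simpa [List.filter_cons, hitem] using hrest

-- keys-lookup map over a Nodup dict is the map over the value column
theorem map_keys_getD {β : Type} (P : List (Int × List Int)) (f : List Int → β)
    (hnd : (P.map Prod.fst).Nodup) :
    (PySem.Dict.keys (PySem.Dict.mk P)).map
        (fun k => f (PySem.Dict.getD (PySem.Dict.mk P) k [])) = P.map (fun p => f p.2) := by
  have hv := PySem.Dict.values_eq_map_keys (d := PySem.Dict.mk P) (by simpa using hnd) []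
  have : (PySem.Dict.keys (PySem.Dict.mk P)).map
      (fun k => f (PySem.Dict.getD (PySem.Dict.mk P) k [])) =
      ((PySem.Dict.keys (PySem.Dict.mk P)).map
        (fun k => PySem.Dict.getD (PySem.Dict.mk P) k [])).map f := by
    rw [List.map_map]; rfl
  rw [this, ← hv]
  have hval : PySem.Dict.values (PySem.Dict.mk P) = P.map Prod.snd := rfl
  rw [hval, List.map_map]; rfl

theorem getD_mk_of_mem (P : List (Int × List Int)) (hnd : (P.map Prod.fst).Nodup)
    (p : Int × List Int) (hp : p ∈ P) :
    PySem.Dict.getD (PySem.Dict.mk P) p.1 [] = p.2 :=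
  PySem.Dict.getD_of_mem_items (d := PySem.Dict.mk P) (k := p.1) (v := p.2)
    (by simpa using hp) (by simpa using hnd) []

-- ===== VERDICT (by name: the statement is the Claim_ definition above) =====
theorem remove_undos_spec : Claim_equal_remove_undos := by
  intro P U _ hpre
  obtain ⟨hndP, hndU, -, -⟩ := hpre
  unfold Spec_remove_undos remove_undos remove_undos_alt
  by_cases hU : U = []
  · subst hU
    show (PySem.Dict.keys (PySem.Dict.mk P)).foldl
        (fun out k => out ++ [PySem.List.pyGetD (PySem.Dict.getD (PySem.Dict.mk P) k []) 0 0]) [] =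
      (P.filter (fun jv => !(PySem.Set.contains (PySem.Set.empty : PySem.Set Int) jv.1))).map
        (fun jv => PySem.List.pyGetD jv.2 0 0)
    rw [PySem.List.foldl_append_singleton_eq_map, List.nil_append,
      map_keys_getD P (fun v => PySem.List.pyGetD v 0 0) hndP]
    have hfilter : (P.filter (fun jv => !(PySem.Set.contains (PySem.Set.empty : PySem.Set Int) jv.1))) = P :=
      List.filter_eq_self.mpr (fun p _ => rfl)
    rw [hfilter]
  · -- to_delete and deleted are computed by pointwise-equal folds
    have hsize : (PySem.Dict.size (PySem.Dict.mk U) > 0) = True := by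
      simp [PySem.Dict.size, List.length_pos_iff, hU]
    have hempty : U.isEmpty = false := by simp [hU]
    simp only [hsize, if_true, hempty, Bool.false_eq_true, if_false]
    have hkeysU : PySem.Dict.keys (PySem.Dict.mk U) = U.map Prod.fst := rfl
    have hkeysP : PySem.Dict.keys (PySem.Dict.mk P) = P.map Prod.fst := rfl
    rw [hkeysU,
      foldl_keys_getD U (PySem.Dict.mk U) []
        (fun td i v =>
          removeUndosInnerA (PySem.Dict.mk P) (PySem.List.pyGetD v 0 0)
            (PySem.List.pyGetD v 1 0) td (PySem.Dict.keys (PySem.Dict.mk P))) []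
        (fun p hp => getD_mk_of_mem U hndU p hp)]
    have hstep : ∀ (td : List Int) (uv : Int × List Int), uv ∈ U →
        removeUndosInnerA (PySem.Dict.mk P) (PySem.List.pyGetD uv.2 0 0)
            (PySem.List.pyGetD uv.2 1 0) td (PySem.Dict.keys (PySem.Dict.mk P)) =
          match removeUndosScanB td (PySem.List.pyGetD uv.2 1 0)
              (PySem.Dict.getD
                (P.foldl (fun b jv =>
                  PySem.Dict.modify b (PySem.List.pyGetD jv.2 0 0) []
                    (fun l => l ++ [jv])) PySem.Dict.empty)
                (PySem.List.pyGetD uv.2 0 0) []) with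
          | some j => PySem.Set.add td j
          | none => td := by
      intro td uv _
      rw [hkeysP, innerA_eq_scanB P (PySem.Dict.mk P) _ _ td
        (fun p hp => getD_mk_of_mem P hndP p hp), bucket_getD]
      cases hscan : removeUndosScanB td (PySem.List.pyGetD uv.2 1 0)
          (P.filter (fun jv => PySem.List.pyGetD jv.2 0 0 == PySem.List.pyGetD uv.2 0 0)) with
      | none => rfl
      | some j =>
        have hni := scanB_not_mem td _ _ j hscan
        simp [PySem.Set.add]
        simpa using hni
    have hfold : U.foldl (fun td uv =>
          removeUndosInnerA (PySem.Dict.mk P) (PySem.List.pyGetD uv.2 0 0)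
            (PySem.List.pyGetD uv.2 1 0) td (PySem.Dict.keys (PySem.Dict.mk P))) [] =
        U.foldl (fun del uv =>
          match removeUndosScanB del (PySem.List.pyGetD uv.2 1 0)
              (PySem.Dict.getD
                (P.foldl (fun b jv =>
                  PySem.Dict.modify b (PySem.List.pyGetD jv.2 0 0) []
                    (fun l => l ++ [jv])) PySem.Dict.empty)
                (PySem.List.pyGetD uv.2 0 0) []) with
          | some j => PySem.Set.add del j
          | none => del) PySem.Set.empty := by
      apply PySem.List.foldl_congr_mem
      intro acc x hx
      exact hstep acc x hx
    rw [hfold]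
    set td := U.foldl (fun del uv =>
          match removeUndosScanB del (PySem.List.pyGetD uv.2 1 0)
              (PySem.Dict.getD
                (P.foldl (fun b jv =>
                  PySem.Dict.modify b (PySem.List.pyGetD jv.2 0 0) []
                    (fun l => l ++ [jv])) PySem.Dict.empty)
                (PySem.List.pyGetD uv.2 0 0) []) with
          | some j => PySem.Set.add del j
          | none => del) PySem.Set.empty with htd
    -- both sides now filter P by the same deleted keys
    have herase : (if td.length > 0 then
          td.foldl (fun d k => PySem.Dict.erase d k) (PySem.Dict.mk P)
        else PySem.Dict.mk P) =
        td.foldl (fun d k => PySem.Dict.erase d k) (PySem.Dict.mk P) := by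
      cases td <;> simp
    rw [herase]
    have hitems : (td.foldl (fun d k => PySem.Dict.erase d k) (PySem.Dict.mk P)) =
        PySem.Dict.mk (P.filter (fun p => !(td.contains p.1))) := by
      apply PySem.Dict.ext
      rw [items_foldl_erase]; rfl
    rw [hitems]
    have hndF : ((P.filter (fun p => !(td.contains p.1))).map Prod.fst).Nodup := by
      exact List.Sublist.nodup (List.Sublist.map Prod.fst List.filter_sublist) hndP
    rw [PySem.List.foldl_append_singleton_eq_map, List.nil_append,
      map_keys_getD _ (fun v => PySem.List.pyGetD v 0 0) hndF]
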